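-- pv_equiv track=rewrite | github.com/phupd202/design_and_analyst_algorithm | LT_6/PhamDuyPhu_20001958.py | case_1
-- ===== SOURCE A (Python) =====
-- def case_1(file_sizes):
--     n = len(file_sizes)
--     tmp = file_sizes[0]
--     complexity = 0
--
--     for i in range(1, n):
--         tmp = tmp + file_sizes[i]
--         complexity = complexity + tmp
--     return complexity
-- ===== SOURCE B (Python) =====
-- def case_1(file_sizes):
--     # weighted sum: element j contributes to every retained prefix sum,
--     # with coefficient n - j for j >= 1 and n - 1 for the first element
--     n = len(file_sizes)
--     return sum(x * (n - j if j else n - 1) for j, x in enumerate(file_sizes))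
-- ===== Notes on version B (the rewrite author's own statement) =====
-- stated objective: alternative
-- what changed: Replaces the running prefix-sum accumulator loop with a single positional weighted sum: element j contributes with coefficient n-j (n-1 for j=0), so no prefix accumulator is kept.
-- outside the precondition, e.g. on case_1([]): A raises IndexError, B returns 0
import Mathlib
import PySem

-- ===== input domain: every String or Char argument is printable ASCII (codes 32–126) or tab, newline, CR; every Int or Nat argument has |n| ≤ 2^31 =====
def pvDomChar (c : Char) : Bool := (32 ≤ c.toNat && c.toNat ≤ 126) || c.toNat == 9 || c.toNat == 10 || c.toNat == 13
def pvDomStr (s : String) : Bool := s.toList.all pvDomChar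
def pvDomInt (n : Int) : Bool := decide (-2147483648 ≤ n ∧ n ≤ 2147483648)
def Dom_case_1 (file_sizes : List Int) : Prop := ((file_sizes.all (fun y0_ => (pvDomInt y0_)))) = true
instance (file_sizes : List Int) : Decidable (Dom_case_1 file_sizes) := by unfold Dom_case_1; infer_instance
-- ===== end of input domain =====

-- B replaces A's running prefix-sum accumulator with a single positional weighted
-- sum (element j weighted by n-j, first element by n-1); same O(n) cost, different decomposition.


-- ===== PORT A =====
def case_1 (file_sizes : List Int) : Int :=
  let n : Int := file_sizes.length
  match PySem.List.pyGet? file_sizes 0 with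
  | none => 0   -- IndexError on the empty list; excluded by Pre_case_1
  | some t0 =>
    ((PySem.List.pyRange 1 n 1).foldl
      (fun (s : Int × Int) i =>
        let tmp := s.1 + PySem.List.pyGetD file_sizes i 0
        (tmp, s.2 + tmp)) (t0, 0)).2

-- ===== PORT B =====
def case_1_alt (file_sizes : List Int) : Int :=
  let n : Int := file_sizes.length
  (PySem.List.enumerate file_sizes 0).foldl
    (fun acc jx => acc + jx.2 * (if jx.1 = 0 then n - 1 else n - jx.1)) 0

-- ===== PRECONDITION & SPEC =====
def Pre_case_1 (file_sizes : List Int) : Prop := file_sizes ≠ []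
instance (file_sizes : List Int) : Decidable (Pre_case_1 file_sizes) := by unfold Pre_case_1; infer_instance
def pvWitness_case_1 : List Int := ([3, 1, 4])

def Spec_case_1 (file_sizes : List Int) (out : Int) : Prop := out = case_1_alt file_sizes
instance (file_sizes : List Int) (out : Int) : Decidable (Spec_case_1 file_sizes out) := by unfold Spec_case_1; infer_instance

-- ===== CLAIM (what is proved, stated in full; the proofs are below) =====
def Claim_equal_case_1 : Prop := ∀ (file_sizes : List Int), Dom_case_1 file_sizes → Pre_case_1 file_sizes → Spec_case_1 file_sizes (case_1 file_sizes)

-- ===== LEMMAS AND PROOFS =====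

-- Σ_k l[k] * (|l| - k), the weighted sum both sides reduce to
def wsum : List Int → Int
  | [] => 0
  | x :: l => x * ((l.length : Int) + 1) + wsum l

theorem foldA_eq_wsum (l : List Int) (a c : Int) :
    (l.foldl (fun (s : Int × Int) x => (s.1 + x, s.2 + (s.1 + x))) (a, c)).2
      = c + a * (l.length : Int) + wsum l := by
  induction l generalizing a c with
  | nil => simp [wsum]
  | cons x l ih =>
    simp only [List.foldl_cons, wsum, ih, List.length_cons]
    push_cast
    ring

theorem foldB_eq_wsum (n : Int) (l : List Int) (s acc : Int) (hs : 1 ≤ s) :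
    (PySem.List.enumerate l s).foldl
        (fun acc jx => acc + jx.2 * (if jx.1 = 0 then n - 1 else n - jx.1)) acc
      = acc + wsum l + (n - s - (l.length : Int)) * l.sum := by
  induction l generalizing s acc with
  | nil => simp [PySem.List.enumerate_nil, wsum]
  | cons x l ih =>
    rw [PySem.List.enumerate_cons]
    simp only [List.foldl_cons, if_neg (by omega : ¬ s = 0)]
    rw [ih (s + 1) _ (by omega)]
    simp only [wsum, List.length_cons, List.sum_cons]
    push_cast
    ring

-- ===== VERDICT (by name: the statement is the Claim_ definition above) =====
theorem case_1_spec : Claim_equal_case_1 := by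
  intro fs _ hpre
  cases fs with
  | nil => exact absurd rfl hpre
  | cons a l =>
    unfold Spec_case_1 case_1 case_1_alt
    rw [PySem.List.pyGet?_zero_cons]
    dsimp only
    rw [PySem.List.foldl_pyRange_pyGetD' (a :: l) 0
          (fun (s : Int × Int) x => (s.1 + x, s.2 + (s.1 + x))) (a, 0)
          (by norm_num : (0:Int) ≤ 1)]
    simp only [show ((1:Int)).toNat = 1 from rfl, List.drop_succ_cons, List.drop_zero]
    rw [foldA_eq_wsum]
    rw [PySem.List.enumerate_cons, List.foldl_cons, if_pos rfl]
    rw [foldB_eq_wsum _ _ _ _ (by norm_num : (1:Int) ≤ 0 + 1)]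
    simp only [List.length_cons]
    push_cast
    ring
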